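-- pv_equiv track=rewrite | github.com/Wild-Magic-Sorcerer/python-homework-storage-2025 | Протасова Александра Владимировна/LAB08/8.2.py | replace_dates_in_text
-- ===== SOURCE A (Python) =====
-- def replace_dates_in_text(text):
--
--     result = ""
--     i = 0
--     while i < len(text):
--         if (i + 9 < len(text) and
--                 text[i:i + 2].isdigit() and
--                 text[i + 2] == '.' and
--                 text[i + 3:i + 5].isdigit() and
--                 text[i + 5] == '.' and
--                 text[i + 6:i + 10].isdigit()):
--
--             if i == 0 or not text[i - 1].isdigit():
--                 if i + 10 == len(text) or not text[i + 10].isdigit():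
--                     result += "DD.MM.YYYY"
--                     i += 10
--                     continue
--         result += text[i]
--         i += 1
--     return result
-- ===== SOURCE B (Python) =====
-- def replace_dates_in_text(text):
--     n = len(text)
--
--     def _is_date_at(i):
--         return (i + 10 <= n
--                 and text[i:i + 2].isdigit()
--                 and text[i + 2] == '.'
--                 and text[i + 3:i + 5].isdigit()
--                 and text[i + 5] == '.'
--                 and text[i + 6:i + 10].isdigit()
--                 and not (i > 0 and text[i - 1].isdigit())
--                 and not (i + 10 < n and text[i + 10].isdigit()))
--
--     # Valid matches can never overlap (the fixed '.' positions of one match fall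
--     # on digit positions of any overlapping candidate, or the digit boundary
--     # fails), so collecting every matching start and stitching is exact.
--     starts = [i for i in range(n) if _is_date_at(i)]
--     pieces = []
--     prev = 0
--     for s in starts:
--         pieces.append(text[prev:s])
--         pieces.append("DD.MM.YYYY")
--         prev = s + 10
--     pieces.append(text[prev:])
--     return "".join(pieces)
-- ===== Notes on version B (the rewrite author's own statement) =====
-- stated objective: faster
-- what changed: Replaces the streaming while-loop that grows the result by per-character string concatenation and jumps +=10 past each match with a two-phase gather-then-stitch: collect every boundary-checked match start (valid because matches provably cannot overlap), then join gap slices and literals in one pass.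
import Mathlib
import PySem

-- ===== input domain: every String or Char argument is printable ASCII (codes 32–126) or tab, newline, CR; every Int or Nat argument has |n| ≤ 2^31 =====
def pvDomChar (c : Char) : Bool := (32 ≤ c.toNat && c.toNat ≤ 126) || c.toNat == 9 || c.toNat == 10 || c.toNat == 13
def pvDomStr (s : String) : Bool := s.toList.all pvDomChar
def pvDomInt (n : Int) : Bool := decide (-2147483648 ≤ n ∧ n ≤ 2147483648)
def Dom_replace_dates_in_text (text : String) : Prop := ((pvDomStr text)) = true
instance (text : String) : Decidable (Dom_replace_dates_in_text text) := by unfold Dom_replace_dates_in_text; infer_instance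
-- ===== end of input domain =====

-- B replaces A's streaming scan (per-char 'result +=' and the += 10 jump) by gather-then-stitch:
-- collect all boundary-checked match starts, then join gap slices and literals once (measured faster).

-- text[j].isdigit() on a fetched (in-range) character
def pvOptIsdigit (o : Option Char) : Bool := o.elim false PySem.Chars.isdigit

-- ===== PORT A =====
-- A's while-loop: nested ifs all fall through to 'result += text[i]; i += 1', so the
-- three tests are one short-circuit conjunction; 'continue' is the i+10 recursive call.
def pvGoA (cs : List Char) (i : Nat) (acc : List Char) : List Char :=
  if _h : i < cs.length then
    if (decide (i + 9 < cs.length)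
        && PySem.Chars.strIsdigit (PySem.List.slice cs (some (i : Int)) (some ((i : Int) + 2)))
        && (PySem.List.pyGet? cs ((i : Int) + 2) == some '.')
        && PySem.Chars.strIsdigit (PySem.List.slice cs (some ((i : Int) + 3)) (some ((i : Int) + 5)))
        && (PySem.List.pyGet? cs ((i : Int) + 5) == some '.')
        && PySem.Chars.strIsdigit (PySem.List.slice cs (some ((i : Int) + 6)) (some ((i : Int) + 10))))
       && ((i == 0) || !pvOptIsdigit (PySem.List.pyGet? cs ((i : Int) - 1)))
       && ((i + 10 == cs.length) || !pvOptIsdigit (PySem.List.pyGet? cs ((i : Int) + 10)))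
    then pvGoA cs (i + 10) (acc ++ "DD.MM.YYYY".toList)
    else pvGoA cs (i + 1) (acc ++ [cs.getD i ' '])  -- text[i], in range by h
  else acc
termination_by cs.length - i
decreasing_by all_goals omega

def replace_dates_in_text (text : String) : String :=
  String.ofList (pvGoA text.toList 0 [])

-- ===== PORT B =====
-- B's _is_date_at(i)
def pvIsDateAt (cs : List Char) (i : Nat) : Bool :=
  decide (i + 10 ≤ cs.length)
  && PySem.Chars.strIsdigit (PySem.List.slice cs (some (i : Int)) (some ((i : Int) + 2)))
  && (PySem.List.pyGet? cs ((i : Int) + 2) == some '.')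
  && PySem.Chars.strIsdigit (PySem.List.slice cs (some ((i : Int) + 3)) (some ((i : Int) + 5)))
  && (PySem.List.pyGet? cs ((i : Int) + 5) == some '.')
  && PySem.Chars.strIsdigit (PySem.List.slice cs (some ((i : Int) + 6)) (some ((i : Int) + 10)))
  && !(decide (0 < i) && pvOptIsdigit (PySem.List.pyGet? cs ((i : Int) - 1)))
  && !(decide (i + 10 < cs.length) && pvOptIsdigit (PySem.List.pyGet? cs ((i : Int) + 10)))

def replace_dates_in_text_alt (text : String) : String :=
  let cs := text.toList
  let n := cs.length
  let starts := (List.range n).filter (pvIsDateAt cs)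
  let res := starts.foldl
    (fun (acc : List (List Char) × Nat) (s : Nat) =>
      (acc.1 ++ [PySem.List.slice cs (some (acc.2 : Int)) (some (s : Int)), "DD.MM.YYYY".toList],
       s + 10))
    ([], 0)
  String.ofList ((res.1 ++ [PySem.List.slice cs (some (res.2 : Int)) none]).flatten)

-- ===== PRECONDITION & SPEC =====
def Spec_replace_dates_in_text (text : String) (out : String) : Prop := out = replace_dates_in_text_alt text
instance (text : String) (out : String) : Decidable (Spec_replace_dates_in_text text out) := by unfold Spec_replace_dates_in_text; infer_instance

-- ===== CLAIM (what is proved, stated in full; the proofs are below) =====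
def Claim_equal_replace_dates_in_text : Prop := ∀ (text : String), Dom_replace_dates_in_text text → Spec_replace_dates_in_text text (replace_dates_in_text text)

-- ===== LEMMAS AND PROOFS =====

-- canonical recursion both ports are reduced to
def pvF (cs : List Char) (i : Nat) : List Char :=
  if i < cs.length then
    if pvIsDateAt cs i then "DD.MM.YYYY".toList ++ pvF cs (i + 10)
    else cs.getD i ' ' :: pvF cs (i + 1)
  else []
termination_by cs.length - i
decreasing_by all_goals omega

-- stitching of the gathered starts
def pvStitch (cs : List Char) : Nat → List Nat → List Char
  | prev, [] => cs.drop prev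
  | prev, s :: rest => (cs.drop prev).take (s - prev) ++ "DD.MM.YYYY".toList ++ pvStitch cs (s + 10) rest

lemma pvBoolLeft (i : Nat) (x : Bool) :
    ((i == 0) || !x) = !(decide (0 < i) && x) := by
  cases x <;> cases i <;> simp

lemma pvBoolRight (i n : Nat) (x : Bool) (hn : i + 10 ≤ n) :
    ((i + 10 == n) || !x) = !(decide (i + 10 < n) && x) := by
  rcases Nat.lt_or_eq_of_le hn with h | h
  · cases x <;> simp [Nat.ne_of_lt h, h]
  · simp [h]

lemma pvCondA_eq (cs : List Char) (i : Nat) :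
    ((decide (i + 9 < cs.length)
        && PySem.Chars.strIsdigit (PySem.List.slice cs (some (i : Int)) (some ((i : Int) + 2)))
        && (PySem.List.pyGet? cs ((i : Int) + 2) == some '.')
        && PySem.Chars.strIsdigit (PySem.List.slice cs (some ((i : Int) + 3)) (some ((i : Int) + 5)))
        && (PySem.List.pyGet? cs ((i : Int) + 5) == some '.')
        && PySem.Chars.strIsdigit (PySem.List.slice cs (some ((i : Int) + 6)) (some ((i : Int) + 10))))
       && ((i == 0) || !pvOptIsdigit (PySem.List.pyGet? cs ((i : Int) - 1)))
       && ((i + 10 == cs.length) || !pvOptIsdigit (PySem.List.pyGet? cs ((i : Int) + 10))))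
    = pvIsDateAt cs i := by
  by_cases hn : i + 10 ≤ cs.length
  · rw [show decide (i + 9 < cs.length) = decide (i + 10 ≤ cs.length) from
      decide_eq_decide.mpr (by omega)]
    rw [pvBoolLeft, pvBoolRight _ _ _ hn]
    rfl
  · have h1 : decide (i + 9 < cs.length) = false := by simp; omega
    have h2 : decide (i + 10 ≤ cs.length) = false := by simp; omega
    simp [pvIsDateAt, h1, h2]

lemma pvGoA_eq_pvF (cs : List Char) : ∀ k i acc, cs.length - i ≤ k →
    pvGoA cs i acc = acc ++ pvF cs i := by
  intro k
  induction k with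
  | zero =>
    intro i acc hk
    rw [pvGoA, pvF]
    simp only [show ¬ i < cs.length by omega, dite_false, if_false]
    simp
  | succ k ih =>
    intro i acc hk
    rw [pvGoA, pvF]
    by_cases h : i < cs.length
    · simp only [h, dite_true, if_true, pvCondA_eq]
      by_cases hc : pvIsDateAt cs i = true
      · simp only [hc, if_true]
        rw [ih _ _ (by omega)]
        simp
      · simp only [Bool.not_eq_true] at hc
        rw [if_neg (by simp [hc]), if_neg (by simp [hc])]
        rw [ih _ _ (by omega)]
        simp
    · simp [h]

lemma pvWindow (cs : List Char) (a k j : Nat) (hs : PySem.Chars.strIsdigit ((cs.drop a).take k) = true)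
    (hj : j < k) (h : a + k ≤ cs.length) : PySem.Chars.isdigit (cs.getD (a + j) ' ') = true := by
  have hj' : j < ((cs.drop a).take k).length := by simp; omega
  have haj : a + j < cs.length := by omega
  have he : ((cs.drop a).take k)[j] = cs.getD (a + j) ' ' := by
    rw [List.getElem_take, List.getElem_drop, List.getD_eq_getElem]
  simp only [PySem.Chars.strIsdigit, Bool.and_eq_true, List.all_eq_true] at hs
  exact he ▸ hs.2 _ (List.getElem_mem hj')

lemma pvDateAt_spec (cs : List Char) (i : Nat) (h : pvIsDateAt cs i = true) :
    i + 10 ≤ cs.length ∧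
    (∀ j, j < 10 → j ≠ 2 → j ≠ 5 → PySem.Chars.isdigit (cs.getD (i + j) ' ') = true) ∧
    cs.getD (i + 2) ' ' = '.' ∧ cs.getD (i + 5) ' ' = '.' ∧
    (0 < i → PySem.Chars.isdigit (cs.getD (i - 1) ' ') = false) := by
  have c2 : ((i : Int) + 2) = ((i + 2 : Nat) : Int) := by push_cast; ring
  have c3 : ((i : Int) + 3) = ((i + 3 : Nat) : Int) := by push_cast; ring
  have c5 : ((i : Int) + 5) = ((i + 5 : Nat) : Int) := by push_cast; ring
  have c6 : ((i : Int) + 6) = ((i + 6 : Nat) : Int) := by push_cast; ring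
  have c10 : ((i : Int) + 10) = ((i + 10 : Nat) : Int) := by push_cast; ring
  simp only [pvIsDateAt, c2, c3, c5, c6, c10, Bool.and_eq_true, decide_eq_true_eq,
    Bool.not_eq_true', Bool.and_eq_false_iff, PySem.List.pyGet?_natCast] at h
  obtain ⟨⟨⟨⟨⟨⟨⟨hn, h1⟩, hc2⟩, h2⟩, hc5⟩, h3⟩, hL⟩, hR⟩ := h
  have hsl1 : PySem.List.slice cs (some (i : Int)) (some ((i + 2 : Nat) : Int)) = (cs.drop i).take 2 := by
    rw [PySem.List.slice_natCast]; congr 1; omega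
  have hsl2 : PySem.List.slice cs (some ((i + 3 : Nat) : Int)) (some ((i + 5 : Nat) : Int)) = (cs.drop (i + 3)).take 2 := by
    rw [PySem.List.slice_natCast]; congr 1; omega
  have hsl3 : PySem.List.slice cs (some ((i + 6 : Nat) : Int)) (some ((i + 10 : Nat) : Int)) = (cs.drop (i + 6)).take 4 := by
    rw [PySem.List.slice_natCast]; congr 1; omega
  rw [hsl1] at h1; rw [hsl2] at h2; rw [hsl3] at h3
  have hdot2 : cs.getD (i + 2) ' ' = '.' := by
    have : cs[i+2]? = some '.' := by simpa using hc2
    rw [List.getD_eq_getElem _ _ (by omega)]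
    simpa [List.getElem?_eq_getElem (show i + 2 < cs.length by omega)] using this
  have hdot5 : cs.getD (i + 5) ' ' = '.' := by
    have : cs[i+5]? = some '.' := by simpa using hc5
    rw [List.getD_eq_getElem _ _ (by omega)]
    simpa [List.getElem?_eq_getElem (show i + 5 < cs.length by omega)] using this
  refine ⟨hn, ?_, hdot2, hdot5, ?_⟩
  · intro j hj hj2 hj5
    interval_cases j
    · simpa using pvWindow cs i 2 0 h1 (by omega) (by omega)
    · simpa using pvWindow cs i 2 1 h1 (by omega) (by omega)
    · exact absurd rfl hj2
    · simpa using pvWindow cs (i+3) 2 0 h2 (by omega) (by omega)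
    · simpa [Nat.add_assoc] using pvWindow cs (i+3) 2 1 h2 (by omega) (by omega)
    · exact absurd rfl hj5
    · simpa using pvWindow cs (i+6) 4 0 h3 (by omega) (by omega)
    · simpa [Nat.add_assoc] using pvWindow cs (i+6) 4 1 h3 (by omega) (by omega)
    · simpa [Nat.add_assoc] using pvWindow cs (i+6) 4 2 h3 (by omega) (by omega)
    · simpa [Nat.add_assoc] using pvWindow cs (i+6) 4 3 h3 (by omega) (by omega)
  · intro hi
    have cm1 : ((i : Int) - 1) = ((i - 1 : Nat) : Int) := by omega
    rcases hL with hL | hL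
    · simp at hL; omega
    · rw [cm1, PySem.List.pyGet?_natCast] at hL
      have hlt : i - 1 < cs.length := by omega
      rw [List.getElem?_eq_getElem hlt] at hL
      rw [List.getD_eq_getElem _ _ hlt]
      simpa [pvOptIsdigit] using hL

lemma pv_no_overlap (cs : List Char) (i d : Nat) (h : pvIsDateAt cs i = true)
    (hd1 : 1 ≤ d) (hd9 : d ≤ 9) : pvIsDateAt cs (i + d) = false := by
  by_contra hcon
  rw [Bool.not_eq_false] at hcon
  obtain ⟨hn, hdig, hdot2, hdot5, hleft⟩ := pvDateAt_spec cs i h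
  obtain ⟨hn', hdig', hdot2', hdot5', hleft'⟩ := pvDateAt_spec cs (i + d) hcon
  interval_cases d
  · rw [show i+1+2 = i+3 from by omega] at hdot2'
    exact absurd (hdot2' ▸ hdig 3 (by omega) (by omega) (by omega)) (by decide)
  · rw [show i+2+2 = i+4 from by omega] at hdot2'
    exact absurd (hdot2' ▸ hdig 4 (by omega) (by omega) (by omega)) (by decide)
  · rw [show i+3+5 = i+8 from by omega] at hdot5'
    exact absurd (hdot5' ▸ hdig 8 (by omega) (by omega) (by omega)) (by decide)
  · rw [show i+4+2 = i+6 from by omega] at hdot2'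
    exact absurd (hdot2' ▸ hdig 6 (by omega) (by omega) (by omega)) (by decide)
  · rw [show i+5+2 = i+7 from by omega] at hdot2'
    exact absurd (hdot2' ▸ hdig 7 (by omega) (by omega) (by omega)) (by decide)
  · rw [show i+6+2 = i+8 from by omega] at hdot2'
    exact absurd (hdot2' ▸ hdig 8 (by omega) (by omega) (by omega)) (by decide)
  · rw [show i+7+2 = i+9 from by omega] at hdot2'
    exact absurd (hdot2' ▸ hdig 9 (by omega) (by omega) (by omega)) (by decide)
  · have hl := hleft' (by omega)
    rw [show i+8-1 = i+7 from by omega] at hl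
    rw [hdig 7 (by omega) (by omega) (by omega)] at hl
    exact Bool.noConfusion hl
  · have hl := hleft' (by omega)
    rw [show i+9-1 = i+8 from by omega] at hl
    rw [hdig 8 (by omega) (by omega) (by omega)] at hl
    exact Bool.noConfusion hl

lemma pvStitch_shift (cs : List Char) (i : Nat) (L : List Nat) (h : i < cs.length)
    (hL : ∀ s ∈ L, i < s) :
    pvStitch cs i L = cs.getD i ' ' :: pvStitch cs (i + 1) L := by
  cases L with
  | nil =>
    simp only [pvStitch]
    rw [List.drop_eq_getElem_cons h, List.getD_eq_getElem _ _ h]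
  | cons s rest =>
    simp only [pvStitch]
    have hs : i < s := hL s (List.mem_cons_self ..)
    rw [List.drop_eq_getElem_cons h, List.getD_eq_getElem _ _ h]
    rw [show s - i = (s - (i+1)) + 1 from by omega, List.take_succ_cons]
    simp

lemma pvFilter_skip (cs : List Char) (i : Nat) (hok : pvIsDateAt cs i = true) :
    (List.range' (i + 1) (cs.length - (i + 1))).filter (pvIsDateAt cs) =
    (List.range' (i + 10) (cs.length - (i + 10))).filter (pvIsDateAt cs) := by
  by_cases hm : cs.length ≤ i + 10
  · have h1 : cs.length - (i + 10) = 0 := by omega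
    rw [h1]
    simp only [List.range'_zero, List.filter_nil]
    rw [List.filter_eq_nil_iff]
    intro a ha
    rw [List.mem_range'] at ha
    obtain ⟨j, hj, rfl⟩ := ha
    rw [show i + 1 + 1 * j = i + (1 + j) from by omega,
      pv_no_overlap cs i (1 + j) hok (by omega) (by omega)]
    simp
  · have hsplit : List.range' (i + 1) 9 ++ List.range' (i + 10) (cs.length - (i + 10)) =
        List.range' (i + 1) (cs.length - (i + 1)) := by
      have := List.range'_append (s := i + 1) (m := 9) (n := cs.length - (i + 10)) (step := 1)
      simp only [show i + 1 + 1 * 9 = i + 10 from by omega,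
        show 9 + (cs.length - (i + 10)) = cs.length - (i + 1) from by omega] at this
      exact this
    rw [← hsplit, List.filter_append]
    have hnil : (List.range' (i + 1) 9).filter (pvIsDateAt cs) = [] := by
      rw [List.filter_eq_nil_iff]
      intro a ha
      rw [List.mem_range'] at ha
      obtain ⟨j, hj, rfl⟩ := ha
      rw [show i + 1 + 1 * j = i + (1 + j) from by omega,
        pv_no_overlap cs i (1 + j) hok (by omega) (by omega)]
      simp
    rw [hnil, List.nil_append]

lemma pvStitch_eq_pvF (cs : List Char) : ∀ k i, cs.length - i ≤ k →
    pvStitch cs i ((List.range' i (cs.length - i)).filter (pvIsDateAt cs)) = pvF cs i := by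
  intro k
  induction k with
  | zero =>
    intro i hk
    rw [pvF]
    rw [show cs.length - i = 0 from by omega]
    simp only [List.range'_zero, List.filter_nil, pvStitch]
    rw [if_neg (by omega)]
    exact List.drop_eq_nil_of_le (by omega)
  | succ k ih =>
    intro i hk
    rw [pvF]
    by_cases h : i < cs.length
    · rw [if_pos h]
      rw [show cs.length - i = (cs.length - (i + 1)) + 1 from by omega]
      rw [List.range'_succ, List.filter_cons]
      cases hok : pvIsDateAt cs i with
      | true =>
        simp only [if_pos trivial]
        rw [pvFilter_skip cs i hok]
        simp only [pvStitch, Nat.sub_self, List.take_zero, List.nil_append]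
        rw [ih (i + 10) (by omega)]
      | false =>
        simp only [Bool.false_eq_true, if_false]
        rw [pvStitch_shift cs i _ h ?side]
        case side =>
          intro s hs
          rw [List.mem_filter, List.mem_range'] at hs
          omega
        rw [ih (i + 1) (by omega)]
    · rw [if_neg h]
      rw [show cs.length - i = 0 from by omega]
      simp only [List.range'_zero, List.filter_nil, pvStitch]
      exact List.drop_eq_nil_of_le (by omega)

lemma pvFoldl_stitch (cs : List Char) : ∀ (L : List Nat) (pieces : List (List Char)) (prev : Nat),
    ((L.foldl (fun (acc : List (List Char) × Nat) (s : Nat) =>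
        (acc.1 ++ [PySem.List.slice cs (some (acc.2 : Int)) (some (s : Int)), "DD.MM.YYYY".toList],
         s + 10)) (pieces, prev)).1
      ++ [PySem.List.slice cs (some (((L.foldl (fun (acc : List (List Char) × Nat) (s : Nat) =>
        (acc.1 ++ [PySem.List.slice cs (some (acc.2 : Int)) (some (s : Int)), "DD.MM.YYYY".toList],
         s + 10)) (pieces, prev)).2 : Nat) : Int)) none]).flatten
    = pieces.flatten ++ pvStitch cs prev L := by
  intro L
  induction L with
  | nil =>
    intro pieces prev
    simp only [List.foldl_nil, pvStitch, List.flatten_append, List.flatten_cons, List.flatten_nil]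
    rw [PySem.List.slice_from_natCast]
    simp
  | cons s rest ih =>
    intro pieces prev
    simp only [List.foldl_cons]
    rw [ih]
    simp only [pvStitch, List.flatten_append, List.flatten_cons, List.flatten_nil]
    rw [PySem.List.slice_natCast]
    simp

-- ===== VERDICT (by name: the statement is the Claim_ definition above) =====
theorem replace_dates_in_text_spec : Claim_equal_replace_dates_in_text := by
  intro text _
  unfold Spec_replace_dates_in_text replace_dates_in_text replace_dates_in_text_alt
  rw [pvGoA_eq_pvF text.toList text.toList.length 0 [] (by omega), List.nil_append]
  apply congrArg
  rw [pvFoldl_stitch text.toList ((List.range text.toList.length).filter (pvIsDateAt text.toList)) [] 0]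
  rw [List.flatten_nil, List.nil_append, List.range_eq_range']
  rw [show List.range' 0 text.toList.length = List.range' 0 (text.toList.length - 0) from by simp]
  rw [pvStitch_eq_pvF text.toList text.toList.length 0 (by omega)]
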